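-- pv_equiv track=rewrite | github.com/giannpelle/data-profiling | UCC_discovery.py | get_pli_from
-- ===== SOURCE A (Python) =====
-- def get_pli_from(column):
--     pli = {} # valore: [indexes]
--     known_elements = []
--     for index, value in enumerate(column):
--         if value in known_elements:
--             pli.get(known_elements.index(value)).append(index)
--         else:
--             pli.update({len(known_elements): [index]})
--             known_elements.append(value)
--
--     pli = dict(filter(lambda x: len(x[1]) > 1, pli.items()))
--     return pli
-- ===== SOURCE B (Python) =====
-- def get_pli_from(column):
--     pli = {}
--     pairs = list(enumerate(column))
--     rank = 0
--     while pairs: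
--         value = pairs[0][1]
--         positions = [i for i, x in pairs if x == value]
--         if len(positions) > 1:
--             pli[rank] = positions
--         pairs = [(i, x) for i, x in pairs if x != value]
--         rank += 1
--     return pli
-- ===== Notes on version B (the rewrite author's own statement) =====
-- stated objective: alternative
-- what changed: Replaces A's single pass with incremental known_elements membership/index bookkeeping by repeated partition extraction: while elements remain, take the first remaining value, collect all its positions in one scan, delete all its occurrences, and advance the rank; same asymptotic cost, and in CPython B's Python-level scans are constant-factor slower than A's C-level membership tests.
import Mathlib
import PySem

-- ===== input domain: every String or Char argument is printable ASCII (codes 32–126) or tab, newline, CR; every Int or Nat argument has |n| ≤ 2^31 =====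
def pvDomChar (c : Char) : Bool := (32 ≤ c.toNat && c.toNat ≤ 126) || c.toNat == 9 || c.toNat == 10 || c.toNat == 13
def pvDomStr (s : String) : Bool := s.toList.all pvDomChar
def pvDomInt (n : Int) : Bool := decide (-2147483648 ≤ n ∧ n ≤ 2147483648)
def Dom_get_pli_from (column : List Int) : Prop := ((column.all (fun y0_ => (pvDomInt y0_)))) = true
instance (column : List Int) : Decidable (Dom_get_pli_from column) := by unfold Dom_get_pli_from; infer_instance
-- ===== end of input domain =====

-- B replaces A's single pass with incremental known_elements membership/index bookkeeping by
-- repeated partition extraction: take the first remaining value, collect all its positions in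
-- one scan, delete its occurrences, advance the rank (objective: alternative algorithm).


-- ===== PORT A =====
-- loop state: (pli, known_elements); `pli.get(k).append(index)` is an in-place update of the
-- list stored at key k (the key is always present there), ported as Dict.modify.
def get_pli_from (column : List Int) : List (Int × List Int) :=
  let st := (PySem.List.enumerate column 0).foldl
    (fun (st : PySem.Dict Int (List Int) × List Int) p =>
      if p.2 ∈ st.2 then
        (st.1.modify (((PySem.List.index? st.2 p.2).getD 0 : Nat) : Int) [] (fun l => l ++ [p.1]), st.2)
      else
        (st.1.insert (st.2.length : Int) [p.1], st.2 ++ [p.2]))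
    (PySem.Dict.empty, [])
  -- pli = dict(filter(lambda x: len(x[1]) > 1, pli.items()))
  (PySem.Dict.ofList (st.1.items.filter (fun x => decide (1 < x.2.length)))).items

-- ===== PORT B =====
-- the `while pairs:` loop of Source B: extract the first remaining value's positions, insert the
-- group when it has more than one position, delete all its occurrences, advance the rank.
def bLoop : List (Int × Int) → Int → PySem.Dict Int (List Int) → PySem.Dict Int (List Int)
  | [], _, pli => pli
  | p :: t, rank, pli =>
    let positions := ((p :: t).filter (fun q => q.2 == p.2)).map (fun q => q.1)
    bLoop ((p :: t).filter (fun q => !(q.2 == p.2))) (rank + 1)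
      (if 1 < positions.length then pli.insert rank positions else pli)
termination_by l _ _ => l.length
decreasing_by
  simp only [List.filter_cons, beq_self_eq_true, Bool.not_true]
  exact Nat.lt_succ_of_le (List.length_filter_le _ _)

def get_pli_from_alt (column : List Int) : List (Int × List Int) :=
  (bLoop (PySem.List.enumerate column 0) 0 PySem.Dict.empty).items

-- ===== PRECONDITION & SPEC =====
def Spec_get_pli_from (column : List Int) (out : List (Int × List Int)) : Prop := out = get_pli_from_alt column
instance (column : List Int) (out : List (Int × List Int)) : Decidable (Spec_get_pli_from column out) := by unfold Spec_get_pli_from; infer_instance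

-- ===== CLAIM (what is proved, stated in full; the proofs are below) =====
def Claim_equal_get_pli_from : Prop := ∀ (column : List Int), Dom_get_pli_from column → Spec_get_pli_from column (get_pli_from column)

-- ===== LEMMAS AND PROOFS =====

-- first-occurrence dedup of a list of values
def foStep (acc : List Int) (v : Int) : List Int := if v ∈ acc then acc else acc ++ [v]
def fo (vs : List Int) : List Int := vs.foldl foStep []

-- positions (first components) of the pairs carrying value v
def grp (pairs : List (Int × Int)) (v : Int) : List Int :=
  (pairs.filter (fun q => q.2 == v)).map (fun q => q.1)

lemma mem_foStep_of_mem {x : Int} {acc : List Int} (h : x ∈ acc) (y : Int) : x ∈ foStep acc y := by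
  unfold foStep; split_ifs
  · exact h
  · exact List.mem_append_left _ h

lemma foldl_foStep_mem (x : Int) : ∀ (vs acc : List Int),
    x ∈ vs.foldl foStep acc ↔ x ∈ acc ∨ x ∈ vs := by
  intro vs
  induction vs with
  | nil => intro acc; simp
  | cons v t ih =>
    intro acc
    rw [List.foldl_cons, ih]
    unfold foStep
    by_cases h : v ∈ acc
    · rw [if_pos h]
      constructor
      · rintro (h1 | h1)
        · exact Or.inl h1
        · exact Or.inr (List.mem_cons_of_mem _ h1)
      · rintro (h1 | h1)
        · exact Or.inl h1
        · rcases List.mem_cons.mp h1 with h2 | h2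
          · exact Or.inl (h2 ▸ h)
          · exact Or.inr h2
    · rw [if_neg h]
      simp only [List.mem_append, List.mem_cons]
      tauto

lemma mem_fo {x : Int} {vs : List Int} : x ∈ fo vs ↔ x ∈ vs := by
  unfold fo; rw [foldl_foStep_mem]; simp

lemma foldl_foStep_nodup : ∀ (vs acc : List Int), acc.Nodup → (vs.foldl foStep acc).Nodup := by
  intro vs
  induction vs with
  | nil => intro acc h; simpa using h
  | cons v t ih =>
    intro acc h
    rw [List.foldl_cons]
    apply ih
    unfold foStep
    split_ifs with hv
    · exact h
    · simp [List.nodup_append, h]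
      exact fun a ha hb => hv (hb ▸ ha)

lemma nodup_fo (vs : List Int) : (fo vs).Nodup := foldl_foStep_nodup vs [] (by simp)

lemma fo_append (vs : List Int) (v : Int) : fo (vs ++ [v]) = foStep (fo vs) v := by
  unfold fo; rw [List.foldl_append]; rfl

lemma foldl_foStep_filter (v : Int) : ∀ (s acc : List Int), v ∈ acc →
    s.foldl foStep acc = (s.filter (fun x => !(x == v))).foldl foStep acc := by
  intro s
  induction s with
  | nil => intro acc _; rfl
  | cons x t ih =>
    intro acc hv
    rw [List.filter_cons]
    by_cases hx : x = v
    · subst hx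
      rw [if_neg (by simp)]
      have hs : foStep acc x = acc := by unfold foStep; rw [if_pos hv]
      rw [List.foldl_cons, hs]
      exact ih acc hv
    · rw [if_pos (by simp [hx]), List.foldl_cons, List.foldl_cons]
      exact ih (foStep acc x) (mem_foStep_of_mem hv x)

lemma foldl_foStep_cons_out (v : Int) : ∀ (s acc : List Int), (∀ x ∈ s, x ≠ v) →
    s.foldl foStep (v :: acc) = v :: s.foldl foStep acc := by
  intro s
  induction s with
  | nil => intro acc _; rfl
  | cons x t ih =>
    intro acc hs
    have hxv : x ≠ v := hs x (List.mem_cons_self)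
    rw [List.foldl_cons, List.foldl_cons]
    by_cases hmem : x ∈ acc
    · have h1 : foStep (v :: acc) x = v :: acc := by
        unfold foStep; rw [if_pos (List.mem_cons_of_mem _ hmem)]
      have h2 : foStep acc x = acc := by unfold foStep; rw [if_pos hmem]
      rw [h1, h2]
      exact ih acc (fun y hy => hs y (List.mem_cons_of_mem _ hy))
    · have h1 : foStep (v :: acc) x = v :: (acc ++ [x]) := by
        unfold foStep
        rw [if_neg (by simp [hxv, hmem])]
        rfl
      have h2 : foStep acc x = acc ++ [x] := by unfold foStep; rw [if_neg hmem]
      rw [h1, h2]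
      exact ih (acc ++ [x]) (fun y hy => hs y (List.mem_cons_of_mem _ hy))

lemma fo_cons_filter (v : Int) (s : List Int) :
    fo (v :: s) = v :: fo (s.filter (fun x => !(x == v))) := by
  unfold fo
  rw [List.foldl_cons]
  have h0 : foStep [] v = [v] := by unfold foStep; simp
  rw [h0, foldl_foStep_filter v s [v] (by simp)]
  exact foldl_foStep_cons_out v _ [] (by
    intro x hx
    have := List.of_mem_filter hx
    simpa using this)

lemma map_snd_filter_eq (pairs : List (Int × Int)) (c : Int → Bool) :
    (pairs.filter (fun q => c q.2)).map (fun q => q.2) = (pairs.map (fun q => q.2)).filter c := by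
  induction pairs with
  | nil => rfl
  | cons p t ih => by_cases h : c p.2 <;> simp [h, ih]

lemma grp_append_singleton (t : List (Int × Int)) (p : Int × Int) (v : Int) :
    grp (t ++ [p]) v = grp t v ++ (if p.2 = v then [p.1] else []) := by
  unfold grp
  rw [List.filter_append, List.map_append]
  congr 1
  by_cases hv : p.2 = v <;> simp [hv]

lemma grp_cons_ne {p : Int × Int} {v : Int} (h : p.2 ≠ v) (t : List (Int × Int)) :
    grp (p :: t) v = grp t v := by
  unfold grp
  rw [List.filter_cons, if_neg (by simp [h])]

lemma grp_filter_ne (t : List (Int × Int)) {v w : Int} (hvw : v ≠ w) :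
    grp (t.filter (fun q => !(q.2 == w))) v = grp t v := by
  unfold grp
  rw [List.filter_filter]
  congr 1
  apply List.filter_congr
  intro q _
  by_cases h : q.2 = v
  · subst h
    simp [hvw]
  · simp [h]

-- characterization of the grouping dict built by `modify … (· ++ [index])` over value-keyed pairs
lemma G_items : ∀ pairs : List (Int × Int),
    ((pairs.foldl (fun (g : PySem.Dict Int (List Int)) p => g.modify p.2 [] (fun l => l ++ [p.1]))
        PySem.Dict.empty)).items
      = (fo (pairs.map (fun q => q.2))).map (fun v => (v, grp pairs v)) := by
  intro pairs
  induction pairs using List.reverseRecOn with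
  | nil => rfl
  | append_singleton t p ih =>
    rw [List.foldl_append, List.foldl_cons, List.foldl_nil]
    set G := t.foldl (fun (g : PySem.Dict Int (List Int)) p => g.modify p.2 [] (fun l => l ++ [p.1]))
      PySem.Dict.empty with hGdef
    have hkeys : G.keys = fo (t.map (fun q => q.2)) := by
      show G.items.map (fun q => q.1) = _
      rw [ih, List.map_map]
      simp [Function.comp_def]
    have hnd : G.keys.Nodup := by rw [hkeys]; exact nodup_fo _
    have hvs : (t ++ [p]).map (fun q => q.2) = t.map (fun q => q.2) ++ [p.2] := by simp
    have hmod : G.modify p.2 [] (fun l => l ++ [p.1]) = G.insert p.2 (G.getD p.2 [] ++ [p.1]) := rfl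
    rw [hvs, fo_append]
    by_cases h : p.2 ∈ fo (t.map (fun q => q.2))
    · have hc : G.contains p.2 = true := by
        rw [PySem.Dict.contains_eq_decide_mem_keys, hkeys]; simp [h]
      have hmem : (p.2, grp t p.2) ∈ G.items := by
        rw [ih]; exact List.mem_map.mpr ⟨p.2, h, rfl⟩
      have hgd : G.getD p.2 [] = grp t p.2 := PySem.Dict.getD_of_mem_items G hmem hnd []
      have hfs : foStep (fo (t.map (fun q => q.2))) p.2 = fo (t.map (fun q => q.2)) := by
        unfold foStep; rw [if_pos h]
      rw [hmod, hgd, PySem.Dict.items_insert_of_contains _ _ hc, ih, List.map_map, hfs]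
      apply List.map_congr_left
      intro v hv
      simp only [Function.comp_apply]
      by_cases hvp : v = p.2
      · subst hvp
        rw [grp_append_singleton]
        simp
      · have hvp' : ¬ p.2 = v := fun hh => hvp hh.symm
        rw [grp_append_singleton, if_neg hvp', List.append_nil]
        simp [hvp]
    · have hc : G.contains p.2 = false := by
        rw [PySem.Dict.contains_eq_decide_mem_keys, hkeys]; simp [h]
      have hgd : G.getD p.2 [] = [] := PySem.Dict.getD_of_not_contains G [] hc
      have hfs : foStep (fo (t.map (fun q => q.2))) p.2 = fo (t.map (fun q => q.2)) ++ [p.2] := by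
        unfold foStep; rw [if_neg h]
      rw [hmod, hgd, PySem.Dict.items_insert_of_not_contains _ _ hc, ih, hfs, List.map_append]
      congr 1
      · apply List.map_congr_left
        intro v hv
        have hvp : p.2 ≠ v := fun hh => h (hh ▸ hv)
        rw [grp_append_singleton, if_neg hvp, List.append_nil]
      · have hnotin : p.2 ∉ t.map (fun q => q.2) := fun hc' => h (mem_fo.mpr hc')
        have hgt : grp t p.2 = [] := by
          unfold grp
          rw [List.filter_eq_nil_iff.mpr ?_]
          · rfl
          · intro q hq hq2
            exact hnotin (List.mem_map.mpr ⟨q, hq, by simpa using hq2⟩)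
        rw [List.map_cons, List.map_nil, grp_append_singleton, hgt, if_pos rfl]

-- the first components of an enumerate-from-0 list are pairwise distinct
lemma nodup_fst_enumerate (vs : List (List Int)) :
    ((PySem.List.enumerate vs 0).map (fun p => p.1)).Nodup := by
  have h := PySem.List.pairwise_lt_enumerate (xs := vs) (s := 0)
  have : ((PySem.List.enumerate vs 0).map (fun p : Int × List Int => p.1)).Pairwise (· < ·) := by
    rw [List.pairwise_map]; exact h
  exact this.imp (fun hlt => ne_of_lt hlt)

-- the repeated-value step: A's update of pli at key (known.index v) matches the update of
-- the grouping dict at key v, through the invariant pli.items = enumerate groups.values 0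
lemma step_mem (g pli : PySem.Dict Int (List Int)) (hnd : g.keys.Nodup)
    (hp : pli.items = PySem.List.enumerate g.values 0)
    (v i : Int) (hv : v ∈ g.keys) :
    (pli.modify (((PySem.List.index? g.keys v).getD 0 : Nat) : Int) [] (fun l => l ++ [i])).items
      = PySem.List.enumerate (g.modify v [] (fun l => l ++ [i])).values 0 := by
  have hvals : g.values = g.items.map (fun p => p.2) := rfl
  have hkeys : g.keys = g.items.map (fun p => p.1) := rfl
  have hlen : g.values.length = g.keys.length := by rw [hvals, hkeys]; simp
  obtain ⟨idx, hidx⟩ : ∃ k, PySem.List.index? g.keys v = some k :=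
    Option.isSome_iff_exists.mp (by rw [PySem.List.index?_isSome_iff]; exact hv)
  obtain ⟨hidlt, hksidx, _⟩ := PySem.List.getElem_of_index?_eq_some hidx
  have hgditd : (PySem.List.index? g.keys v).getD 0 = idx := by rw [hidx]; rfl
  have hitlen : g.items.length = g.keys.length := by rw [hkeys]; simp
  have hgitem : g.items[idx]'(by omega) = (v, g.values[idx]'(by omega)) := by
    have h1 : g.keys[idx] = (g.items[idx]'(by omega)).1 := by simp [hkeys]
    have h2 : g.values[idx]'(by omega) = (g.items[idx]'(by omega)).2 := by simp [hvals]
    rw [show ((v, g.values[idx]'(by omega)) : Int × List Int)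
        = ((g.items[idx]'(by omega)).1, (g.items[idx]'(by omega)).2) by rw [← h1, ← h2, hksidx]]
  have hgd : g.getD v [] = g.values[idx]'(by omega) :=
    PySem.Dict.getD_of_mem_items g (hgitem ▸ List.getElem_mem _) hnd []
  have hpnd : pli.keys.Nodup := by
    show (pli.items.map (fun p => p.1)).Nodup
    rw [hp]; exact nodup_fst_enumerate _
  have hplitem : ((idx : Int), g.values[idx]'(by omega)) ∈ pli.items := by
    rw [hp]
    have hee := PySem.List.getElem_enumerate g.values 0 idx
      (by rw [PySem.List.length_enumerate]; omega)
    rw [show ((idx : Int), g.values[idx]'(by omega))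
        = (PySem.List.enumerate g.values 0)[idx]'(by rw [PySem.List.length_enumerate]; omega)
        by rw [hee]; simp]
    exact List.getElem_mem _
  have hpc : pli.contains ((idx : Nat) : Int) = true := by
    rw [PySem.Dict.contains_eq_decide_mem_keys]
    simp only [decide_eq_true_eq]
    exact List.mem_map.mpr ⟨_, hplitem, rfl⟩
  have hpgd : pli.getD ((idx : Nat) : Int) [] = g.values[idx]'(by omega) :=
    PySem.Dict.getD_of_mem_items pli hplitem hpnd []
  have hgc : g.contains v = true := by
    rw [PySem.Dict.contains_eq_decide_mem_keys]; simp [hv]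
  have hA : pli.modify ((idx : Nat) : Int) [] (fun l => l ++ [i])
      = pli.insert ((idx : Nat) : Int) (pli.getD ((idx : Nat) : Int) [] ++ [i]) := rfl
  have hB : g.modify v [] (fun l => l ++ [i]) = g.insert v (g.getD v [] ++ [i]) := rfl
  have hBv : (g.insert v (g.getD v [] ++ [i])).values
      = g.items.map (fun p => (if (p.1 == v) = true then ((v, g.getD v [] ++ [i]) : Int × List Int) else p).2) := by
    show List.map _ _ = _
    rw [PySem.Dict.items_insert_of_contains _ _ hgc, List.map_map]
    rfl
  rw [hgditd, hA, hB, PySem.Dict.items_insert_of_contains _ _ hpc, hp, hpgd, hBv, hgd]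
  apply List.ext_getElem
  · rw [PySem.List.length_enumerate]
    simp [hvals]
  · intro j hj1 hj2
    have hjlt : j < g.values.length := by
      simpa [PySem.List.length_enumerate] using hj1
    have hjlt' : j < g.items.length := by omega
    rw [List.getElem_map, PySem.List.getElem_enumerate _ _ _ (by rw [PySem.List.length_enumerate]; omega),
        PySem.List.getElem_enumerate _ _ _ (by simpa using hj2), List.getElem_map]
    have hkj : (g.items[j]'hjlt').1 = g.keys[j]'(by omega) := by simp [hkeys]
    have hvj : (g.items[j]'hjlt').2 = g.values[j]'hjlt := by simp [hvals]
    by_cases hje : j = idx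
    · subst hje
      simp only [hgitem]
      simp
    · have h1 : ((0 + (j:Int)) == ((idx : Nat) : Int)) = false := by simp; omega
      have h2 : ((g.items[j]'hjlt').1 == v) = false := by
        rw [hkj]
        simp only [beq_eq_false_iff_ne, ne_eq]
        intro hc
        exact hje ((List.Nodup.getElem_inj_iff hnd).mp (by rw [hc, hksidx]))
      rw [h1, h2]
      simp [hvj]

-- loop invariant: A's (pli, known) and the grouping dict g stay related by
-- known = g.keys and pli.items = enumerate g.values 0
lemma pliInv (e : List (Int × Int)) :
    ∀ (pli g : PySem.Dict Int (List Int)) (known : List Int),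
    g.keys.Nodup → known = g.keys → pli.items = PySem.List.enumerate g.values 0 →
    (e.foldl (fun (st : PySem.Dict Int (List Int) × List Int) p =>
      if p.2 ∈ st.2 then
        (st.1.modify (((PySem.List.index? st.2 p.2).getD 0 : Nat) : Int) [] (fun l => l ++ [p.1]), st.2)
      else
        (st.1.insert (st.2.length : Int) [p.1], st.2 ++ [p.2])) (pli, known)).1.items
      = PySem.List.enumerate
          (e.foldl (fun (g : PySem.Dict Int (List Int)) p => g.modify p.2 [] (fun l => l ++ [p.1])) g).values 0 := by
  induction e with
  | nil => intro pli g known _ _ hp; simpa using hp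
  | cons p e ih =>
    intro pli g known hnd hk hp
    simp only [List.foldl_cons]
    subst hk
    by_cases hv : p.2 ∈ g.keys
    · rw [if_pos hv]
      have hgc : g.contains p.2 = true := by
        rw [PySem.Dict.contains_eq_decide_mem_keys]; simp [hv]
      have hkm : (g.modify p.2 [] (fun l => l ++ [p.1])).keys = g.keys := by
        rw [PySem.Dict.keys_modify, PySem.Dict.keys_insert_of_contains _ _ hgc]
      exact ih _ _ _ (by rw [hkm]; exact hnd) hkm.symm (step_mem g pli hnd hp p.2 p.1 hv)
    · rw [if_neg hv]
      have hcm : g.contains p.2 = false := by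
        rw [PySem.Dict.contains_eq_decide_mem_keys]; simp [hv]
      have hmod : g.modify p.2 [] (fun l => l ++ [p.1])
          = g.insert p.2 (g.getD p.2 [] ++ [p.1]) := rfl
      have hgd : g.getD p.2 [] = [] := PySem.Dict.getD_of_not_contains g [] hcm
      have hmod' : g.modify p.2 [] (fun l => l ++ [p.1]) = g.insert p.2 [p.1] := by
        rw [hmod, hgd]; rfl
      have hvals : g.values = g.items.map (fun q => q.2) := rfl
      have hkeys : g.keys = g.items.map (fun q => q.1) := rfl
      have hlen : g.values.length = g.keys.length := by rw [hvals, hkeys]; simp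
      refine ih _ _ _ ?_ ?_ ?_
      · rw [hmod']; exact PySem.Dict.nodup_keys_insert g p.2 [p.1] hnd
      · rw [hmod', PySem.Dict.keys_insert_of_not_contains _ _ hcm]
      · have hpk : pli.contains ((g.keys.length : Nat) : Int) = false := by
          rw [PySem.Dict.contains_eq_decide_mem_keys]
          simp only [decide_eq_false_iff_not]
          show ¬ (g.keys.length : Int) ∈ pli.items.map (fun q => q.1)
          rw [hp, PySem.List.map_fst_enumerate]
          rw [PySem.List.mem_pyRange_one]
          omega
        rw [PySem.Dict.items_insert_of_not_contains _ _ hpk, hp, hmod']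
        have hBi : (g.insert p.2 [p.1]).values = g.values ++ [[p.1]] := by
          show List.map _ _ = _
          rw [PySem.Dict.items_insert_of_not_contains _ _ hcm, List.map_append]
          rfl
        rw [hBi, PySem.List.enumerate_append]
        congr 1
        simp [hlen]

-- Dict.ofList over pairs with pairwise-distinct keys keeps the list as its items
lemma items_ofList_nodup (l : List (Int × List Int)) (h : (l.map (fun p => p.1)).Nodup) :
    (PySem.Dict.ofList l).items = l := by
  have hof : PySem.Dict.ofList l = l.foldl (fun d a => d.insert a.1 a.2) PySem.Dict.empty := rfl
  rw [hof, PySem.Dict.items_foldl_insert_fresh l (fun p => p.1) (fun p => p.2) _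
    (fun a _ => PySem.Dict.contains_empty _) h]
  simp
  rfl

-- filtering enumerate keeps its first components pairwise distinct
lemma nodup_fst_filter_enumerate (vs : List (List Int)) (c : Int × List Int → Bool) :
    (((PySem.List.enumerate vs 0).filter c).map (fun p => p.1)).Nodup :=
  (nodup_fst_enumerate vs).sublist (List.filter_sublist.map _)

-- B's extraction loop appends exactly the rank-enumerated groups of size > 1
lemma bLoop_items : ∀ (n : Nat) (pairs : List (Int × Int)) (rank : Int)
    (pli : PySem.Dict Int (List Int)),
    pairs.length ≤ n → (∀ k ∈ pli.keys, k < rank) →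
    (bLoop pairs rank pli).items
      = pli.items ++ (PySem.List.enumerate ((fo (pairs.map (fun q => q.2))).map (grp pairs)) rank).filter
          (fun q => decide (1 < q.2.length)) := by
  intro n
  induction n with
  | zero =>
    intro pairs rank pli hlen hk
    have hnil : pairs = [] := List.eq_nil_of_length_eq_zero (Nat.le_zero.mp hlen)
    subst hnil
    simp [bLoop, fo, PySem.List.enumerate_nil]
  | succ n ih =>
    intro pairs rank pli hlen hk
    match pairs with
    | [] => simp [bLoop, fo, PySem.List.enumerate_nil]
    | p :: t =>
      rw [show bLoop (p :: t) rank pli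
          = bLoop ((p :: t).filter (fun q => !(q.2 == p.2))) (rank + 1)
              (if 1 < (((p :: t).filter (fun q => q.2 == p.2)).map (fun q => q.1)).length
               then pli.insert rank (((p :: t).filter (fun q => q.2 == p.2)).map (fun q => q.1))
               else pli) from by rw [bLoop]]
      have hrest : (p :: t).filter (fun q => !(q.2 == p.2)) = t.filter (fun q => !(q.2 == p.2)) := by
        rw [List.filter_cons, if_neg (by simp)]
      have hrestlen : ((p :: t).filter (fun q => !(q.2 == p.2))).length ≤ n := by
        rw [hrest]
        have h1 := List.length_filter_le (fun q => !(q.2 == p.2)) t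
        have h2 : t.length ≤ n := by simpa using Nat.le_of_succ_le_succ hlen
        omega
      set positions := ((p :: t).filter (fun q => q.2 == p.2)).map (fun q => q.1) with hpos
      have hpli' : ∀ k ∈ (if 1 < positions.length then pli.insert rank positions else pli).keys,
          k < rank + 1 := by
        intro k hkm
        split_ifs at hkm with hif
        · rcases (PySem.Dict.mem_keys_insert _ _ _ _).mp hkm with h1 | h1
          · omega
          · have := hk k h1; omega
        · have := hk k hkm; omega
      rw [ih _ _ _ hrestlen hpli']
      -- rewrite the group list of the remaining pairs into the tail of the original group list
      have hvfo : fo ((p :: t).map (fun q => q.2))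
          = p.2 :: fo ((((p :: t).filter (fun q => !(q.2 == p.2)))).map (fun q => q.2)) := by
        rw [List.map_cons, fo_cons_filter, hrest, ← map_snd_filter_eq t (fun x => !(x == p.2))]
      have hgrps : ((fo ((((p :: t).filter (fun q => !(q.2 == p.2)))).map (fun q => q.2))).map
            (grp ((p :: t).filter (fun q => !(q.2 == p.2)))))
          = ((fo ((((p :: t).filter (fun q => !(q.2 == p.2)))).map (fun q => q.2))).map (grp (p :: t))) := by
        apply List.map_congr_left
        intro v hv
        have hvne : v ≠ p.2 := by
          have hvm : v ∈ (((p :: t).filter (fun q => !(q.2 == p.2)))).map (fun q => q.2) := mem_fo.mp hv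
          rcases List.mem_map.mp hvm with ⟨q, hq, hq2⟩
          have := List.of_mem_filter hq
          simp at this
          rw [← hq2]
          exact this
        rw [hrest, grp_filter_ne t hvne, grp_cons_ne (fun hh => hvne hh.symm) t]
      have hheadgrp : grp (p :: t) p.2 = positions := rfl
      rw [hgrps, hvfo, List.map_cons, hheadgrp, PySem.List.enumerate_cons]
      by_cases hif : 1 < positions.length
      · rw [if_pos hif]
        rw [PySem.Dict.items_insert_of_not_contains _ _ (by
          rw [PySem.Dict.contains_eq_decide_mem_keys]
          simp only [decide_eq_false_iff_not]
          intro hmem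
          have := hk rank hmem
          omega)]
        rw [List.filter_cons, List.append_assoc]
        simp [hif]
      · rw [if_neg hif, List.filter_cons]
        simp [hif]

-- ===== VERDICT (by name: the statement is the Claim_ definition above) =====
theorem get_pli_from_spec : Claim_equal_get_pli_from := by
  intro column _
  unfold Spec_get_pli_from get_pli_from get_pli_from_alt
  dsimp only []
  have hinv := pliInv (PySem.List.enumerate column 0) PySem.Dict.empty PySem.Dict.empty []
    (by simp) (by simp) (by rfl)
  rw [hinv]
  set G := (PySem.List.enumerate column 0).foldl
    (fun (g : PySem.Dict Int (List Int)) p => g.modify p.2 [] (fun l => l ++ [p.1]))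
    PySem.Dict.empty with hG
  rw [items_ofList_nodup _ (nodup_fst_filter_enumerate G.values _)]
  have hGv : G.values
      = (fo ((PySem.List.enumerate column 0).map (fun q => q.2))).map (grp (PySem.List.enumerate column 0)) := by
    show G.items.map (fun q => q.2) = _
    rw [hG, G_items, List.map_map]
    rfl
  rw [hGv]
  rw [bLoop_items (PySem.List.enumerate column 0).length _ 0 PySem.Dict.empty le_rfl (by simp)]
  rw [show (PySem.Dict.empty : PySem.Dict Int (List Int)).items = [] from rfl, List.nil_append]
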